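-- pv_equiv track=rewrite | github.com/Akm592/email_bot | src/tavily_search.py | _organize_results_by_company
-- ===== SOURCE A (Python) =====
-- from typing import Optional, Any, List, Dict
--
-- def _organize_results_by_company(results: List[Dict], companies: List[str]) -> Dict:
--     organized_results = {company: {} for company in companies}
--     query_types = ["Recent news about ", "Job openings at ", "Tech stack at "]
--
--     # Assuming results are in the same order as batch_queries
--     for i, company in enumerate(companies):
--         for j, query_type_prefix in enumerate(query_types):
--             # Calculate the index in the flat results list
--             result_index = i * len(query_types) + j
--             if result_index < len(results):
--                 query_type_key = query_type_prefix.replace(f" {company}", "").strip().replace(" ", "_").lower()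
--                 organized_results[company][query_type_key] = results[result_index]
--     return organized_results
-- ===== SOURCE B (Python) =====
-- from typing import List, Dict
--
-- def _organize_results_by_company(results: List[Dict], companies: List[str]) -> Dict:
--     query_types = ["Recent news about ", "Job openings at ", "Tech stack at "]
--     organized_results = {}
--     rest = results
--     for company in companies:
--         chunk, rest = rest[:3], rest[3:]
--         keys = [q.replace(f" {company}", "").strip().replace(" ", "_").lower()
--                 for q in query_types]
--         organized_results[company] = dict(zip(keys, chunk))
--     return organized_results
-- ===== Notes on version B (the rewrite author's own statement) =====
-- stated objective: alternative
-- what changed: B drops A's flat-index arithmetic (result_index = i*3+j into the full results list, filling pre-created per-company dicts entry by entry) and instead consumes results in chunks of 3 by slicing (chunk, rest = rest[:3], rest[3:]), building each company's inner dict wholesale as dict(zip(keys, chunk)).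
-- outside the precondition, e.g. on _organize_results_by_company([{}], ['X', 'X']): A returns {'X': {'recent_news_about': []}}, B returns {'X': {}}
import Mathlib
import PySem

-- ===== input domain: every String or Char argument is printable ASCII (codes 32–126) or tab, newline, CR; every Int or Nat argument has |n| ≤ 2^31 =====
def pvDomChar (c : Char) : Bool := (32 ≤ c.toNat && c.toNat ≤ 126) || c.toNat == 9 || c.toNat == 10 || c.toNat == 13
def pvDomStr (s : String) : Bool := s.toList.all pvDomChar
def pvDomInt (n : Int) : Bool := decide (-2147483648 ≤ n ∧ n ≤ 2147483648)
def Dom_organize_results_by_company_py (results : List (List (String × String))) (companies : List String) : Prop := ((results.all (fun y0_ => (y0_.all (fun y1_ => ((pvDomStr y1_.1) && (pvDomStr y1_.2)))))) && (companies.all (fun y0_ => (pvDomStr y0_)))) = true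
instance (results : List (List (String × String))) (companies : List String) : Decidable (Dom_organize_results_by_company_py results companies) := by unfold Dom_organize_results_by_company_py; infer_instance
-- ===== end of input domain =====

-- B replaces A's flat-index bookkeeping (result_index = i*3+j into the full results list, filling
-- pre-created per-company dicts entry by entry) by consuming results in chunks of 3 via slicing and
-- building each company's inner dict wholesale as dict(zip(keys, chunk)); same return value on
-- duplicate-free company lists (objective: alternative; same cost, different decomposition).

-- ===== PORT A =====
-- the query-type prefixes (module constant of both Pythons)
def pvQueryTypes : List String := ["Recent news about ", "Job openings at ", "Tech stack at "]

-- the key expression  query_type_prefix.replace(f" {company}", "").strip().replace(" ", "_").lower()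
-- (identical source text in both Pythons, so shared by both ports)
def pvKey (q c : String) : String :=
  PySem.Str.lower (PySem.Str.replace (PySem.Str.strip (PySem.Str.replace q (" " ++ c) "")) " " "_")

def organize_results_by_company_py (results : List (List (String × String))) (companies : List String) : List (String × List (String × List (String × String))) :=
  -- organized_results = {company: {} for company in companies}
  let organized : PySem.Dict String (PySem.Dict String (List (String × String))) :=
    companies.foldl (fun d c => d.insert c PySem.Dict.empty) PySem.Dict.empty
  -- for i, company in enumerate(companies): for j, query_type_prefix in enumerate(query_types):
  --   result_index = i * len(query_types) + j; if result_index < len(results): organized[company][key] = results[result_index]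
  let organized :=
    (PySem.List.enumerate companies).foldl (fun d ic =>
      (PySem.List.enumerate pvQueryTypes).foldl (fun d jq =>
        let result_index : Int := ic.1 * (pvQueryTypes.length : Int) + jq.1
        if result_index < (results.length : Int) then
          d.modify ic.2 PySem.Dict.empty
            (fun inner => inner.insert (pvKey jq.2 ic.2) (PySem.List.pyGetD results result_index []))
        else d) d) organized
  organized.items.map (fun p => (p.1, p.2.items))

-- ===== PORT B =====
def organize_results_by_company_py_alt (results : List (List (String × String))) (companies : List String) : List (String × List (String × List (String × String))) :=
  -- organized_results = {}; rest = results
  -- for company in companies: chunk, rest = rest[:3], rest[3:]; keys = [...per-company keys...];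
  --   organized_results[company] = dict(zip(keys, chunk))
  let final :=
    companies.foldl (fun (st : PySem.Dict String (PySem.Dict String (List (String × String))) × List (List (String × String))) c =>
      let chunk := PySem.List.slice st.2 none (some 3)
      let rest := PySem.List.slice st.2 (some 3) none
      let keys := pvQueryTypes.map (fun q => pvKey q c)
      (st.1.insert c (PySem.Dict.ofList (keys.zip chunk)), rest))
      (PySem.Dict.empty, results)
  final.1.items.map (fun p => (p.1, p.2.items))

-- ===== PRECONDITION & SPEC =====
-- Pre_ excludes companies lists containing a duplicate name: on those A's per-company dict can keep
-- stale entries written by an earlier occurrence of the same name (a dict re-insertion artefact on a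
-- degenerate duplicate-key input), while B naturally rebuilds the inner dict from the last chunk.
def Pre_organize_results_by_company_py (results : List (List (String × String))) (companies : List String) : Prop :=
  companies.Nodup
instance (results : List (List (String × String))) (companies : List String) : Decidable (Pre_organize_results_by_company_py results companies) := by unfold Pre_organize_results_by_company_py; infer_instance

def pvWitness_organize_results_by_company_py : (List (List (String × String))) × List String :=
  ([[("k", "v0")], [("k", "v1")]], ["Acme", "Globex"])

def Spec_organize_results_by_company_py (results : List (List (String × String))) (companies : List String) (out : List (String × List (String × List (String × String)))) : Prop := out = organize_results_by_company_py_alt results companies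
instance (results : List (List (String × String))) (companies : List String) (out : List (String × List (String × List (String × String)))) : Decidable (Spec_organize_results_by_company_py results companies out) := by unfold Spec_organize_results_by_company_py; infer_instance

-- ===== CLAIM (what is proved, stated in full; the proofs are below) =====
def Claim_equal_organize_results_by_company_py : Prop := ∀ (results : List (List (String × String))) (companies : List String), Dom_organize_results_by_company_py results companies → Pre_organize_results_by_company_py results companies → Spec_organize_results_by_company_py results companies (organize_results_by_company_py results companies)

-- ===== LEMMAS AND PROOFS =====

def pvInner (res : List (List (String × String))) (c : String) : PySem.Dict String (List (String × String)) :=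
  PySem.Dict.ofList ((pvQueryTypes.map (fun q => pvKey q c)).zip (res.take 3))

def pvSpec (res : List (List (String × String))) : List String → List (String × PySem.Dict String (List (String × String)))
  | [] => []
  | c :: cs => (c, pvInner res c) :: pvSpec (res.drop 3) cs

def pvFillInner (results : List (List (String × String))) (i : Int) (c : String) : PySem.Dict String (List (String × String)) :=
  (PySem.List.enumerate pvQueryTypes).foldl (fun v jq =>
    let result_index : Int := i * (pvQueryTypes.length : Int) + jq.1
    if result_index < (results.length : Int) then
      v.insert (pvKey jq.2 c) (PySem.List.pyGetD results result_index [])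
    else v) PySem.Dict.empty

-- inner loop of A at one company c (flat index base i): guarded modifies of the same key c act
-- on c's entry only, turning into guarded inserts on that entry's value
theorem pvInnerStep (results : List (List (String × String))) (i : Int) (c : String) :
    ∀ (L : List (Int × String)) (d : PySem.Dict String (PySem.Dict String (List (String × String))))
      (pre tail : List (String × PySem.Dict String (List (String × String))))
      (v : PySem.Dict String (List (String × String))),
      d.items = pre ++ (c, v) :: tail →
      (∀ p ∈ pre, p.1 ≠ c) → (∀ p ∈ tail, p.1 ≠ c) → d.keys.Nodup →
      (L.foldl (fun d jq =>
        let result_index : Int := i * (pvQueryTypes.length : Int) + jq.1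
        if result_index < (results.length : Int) then
          d.modify c PySem.Dict.empty
            (fun inner => inner.insert (pvKey jq.2 c) (PySem.List.pyGetD results result_index []))
        else d) d).items
      = pre ++ (c, L.foldl (fun v jq =>
          let result_index : Int := i * (pvQueryTypes.length : Int) + jq.1
          if result_index < (results.length : Int) then
            v.insert (pvKey jq.2 c) (PySem.List.pyGetD results result_index [])
          else v) v) :: tail := by
  intro L
  induction L with
  | nil => intro d pre tail v hitems _ _ _; simpa using hitems
  | cons jq L ih =>
    intro d pre tail v hitems hpre htail hnd
    by_cases hc : i * (pvQueryTypes.length : Int) + jq.1 < (results.length : Int)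
    · have hmem : (c, v) ∈ d.items := by rw [hitems]; simp
      have hget : d.getD c PySem.Dict.empty = v := PySem.Dict.getD_of_mem_items d hmem hnd _
      have hcont : d.contains c = true := by
        rw [PySem.Dict.contains_iff_mem_keys]
        exact PySem.Dict.mem_keys_of_mem_items d hmem
      have h' : (d.modify c PySem.Dict.empty
            (fun inner => inner.insert (pvKey jq.2 c)
              (PySem.List.pyGetD results (i * (pvQueryTypes.length : Int) + jq.1) []))).items
          = pre ++ (c, v.insert (pvKey jq.2 c)
              (PySem.List.pyGetD results (i * (pvQueryTypes.length : Int) + jq.1) [])) :: tail := by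
        rw [PySem.Dict.modify, PySem.Dict.items_insert_of_contains _ _ hcont, hget, hitems]
        rw [List.map_append]
        congr 1
        · exact (List.map_congr_left (fun p hp => by simp [hpre p hp])).trans (List.map_id' _)
        · simp only [List.map_cons]
          congr 1
          · simp
          · exact (List.map_congr_left (fun p hp => by simp [htail p hp])).trans (List.map_id' _)
      have hkeys : (d.modify c PySem.Dict.empty
            (fun inner => inner.insert (pvKey jq.2 c)
              (PySem.List.pyGetD results (i * (pvQueryTypes.length : Int) + jq.1) []))).keys = d.keys := by
        simp only [PySem.Dict.keys, h', hitems, List.map_append, List.map_cons]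
      simp only [List.foldl_cons, hc, if_pos]
      rw [ih _ pre tail _ h' hpre htail (hkeys ▸ hnd)]
    · simp only [List.foldl_cons, hc, ite_false]
      exact ih d pre tail v hitems hpre htail hnd

-- the value A accumulates for the company at flat base index n is B's chunk dict
theorem pvFillInner_eq (results : List (List (String × String))) (n : Nat) (c : String) :
    pvFillInner results ((n : Nat) : Int) c = pvInner (results.drop (3 * n)) c := by
  have henum : PySem.List.enumerate pvQueryTypes
      = [((0:Int), "Recent news about "), (1, "Job openings at "), (2, "Tech stack at ")] := rfl
  have h0 : ((n : Nat) : Int) * (pvQueryTypes.length : Int) + 0 = ((3 * n + 0 : Nat) : Int) := by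
    simp [pvQueryTypes]; ring
  have h1 : ((n : Nat) : Int) * (pvQueryTypes.length : Int) + 1 = ((3 * n + 1 : Nat) : Int) := by
    simp [pvQueryTypes]; ring
  have h2 : ((n : Nat) : Int) * (pvQueryTypes.length : Int) + 2 = ((3 * n + 2 : Nat) : Int) := by
    simp [pvQueryTypes]; ring
  have hval : ∀ j : Nat, PySem.List.pyGetD results ((3 * n + j : Nat) : Int) []
      = (results.drop (3 * n)).getD j [] := by
    intro j
    rw [PySem.List.pyGetD_natCast]
    simp [List.getD_eq_getElem?_getD, List.getElem?_drop]
  have hg : ∀ j : Nat, (((3 * n + j : Nat) : Int) < (results.length : Int))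
      ↔ j < (results.drop (3 * n)).length := by
    intro j
    rw [Nat.cast_lt, List.length_drop]
    omega
  unfold pvFillInner pvInner
  rw [henum]
  simp only [List.foldl_cons, List.foldl_nil, h0, h1, h2, hval, hg]
  rcases hr : results.drop (3 * n) with _ | ⟨a, _ | ⟨b, _ | ⟨cc, t⟩⟩⟩ <;>
    simp [pvQueryTypes, PySem.Dict.ofList, PySem.Dict.update]

-- A's filling pass over enumerate(companies): each company's entry becomes pvFillInner
theorem pvFillA (results : List (List (String × String))) :
    ∀ (cs : List String) (n : Nat) (d : PySem.Dict String (PySem.Dict String (List (String × String))))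
      (pre : List (String × PySem.Dict String (List (String × String)))),
      cs.Nodup →
      d.items = pre ++ cs.map (fun c => (c, PySem.Dict.empty)) →
      (∀ p ∈ pre, p.1 ∉ cs) →
      d.keys.Nodup →
      ((PySem.List.enumerate cs ((n : Nat) : Int)).foldl (fun d ic =>
        (PySem.List.enumerate pvQueryTypes).foldl (fun d jq =>
          let result_index : Int := ic.1 * (pvQueryTypes.length : Int) + jq.1
          if result_index < (results.length : Int) then
            d.modify ic.2 PySem.Dict.empty
              (fun inner => inner.insert (pvKey jq.2 ic.2) (PySem.List.pyGetD results result_index []))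
          else d) d) d).items
      = pre ++ (PySem.List.enumerate cs ((n : Nat) : Int)).map (fun ic => (ic.2, pvFillInner results ic.1 ic.2)) := by
  intro cs
  induction cs with
  | nil => intro n d pre _ hitems _ _; simpa [PySem.List.enumerate_nil] using hitems
  | cons c cs ih =>
    intro n d pre hnodup hitems hpre hnd
    rw [PySem.List.enumerate_cons, List.foldl_cons, List.map_cons]
    have hitems' : d.items = pre ++ (c, PySem.Dict.empty) :: cs.map (fun c => (c, PySem.Dict.empty)) := by
      simpa using hitems
    have hpre' : ∀ p ∈ pre, p.1 ≠ c := fun p hp => by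
      have := hpre p hp; simp at this; exact this.1
    have htail' : ∀ p ∈ cs.map (fun c => (c, (PySem.Dict.empty : PySem.Dict String (List (String × String))))), p.1 ≠ c := by
      intro p hp
      simp at hp
      obtain ⟨x, hx, rfl⟩ := hp
      simp at hnodup ⊢
      intro h; exact hnodup.1 (h ▸ hx)
    have hstep := pvInnerStep results ((n : Nat) : Int) c (PySem.List.enumerate pvQueryTypes) d pre
      (cs.map (fun c => (c, PySem.Dict.empty))) PySem.Dict.empty hitems' hpre' htail' hnd
    have hkeys : ((PySem.List.enumerate pvQueryTypes).foldl (fun d jq =>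
        let result_index : Int := ((n : Nat) : Int) * (pvQueryTypes.length : Int) + jq.1
        if result_index < (results.length : Int) then
          d.modify c PySem.Dict.empty
            (fun inner => inner.insert (pvKey jq.2 c) (PySem.List.pyGetD results result_index []))
        else d) d).keys = d.keys := by
      simp only [PySem.Dict.keys, hstep, hitems', List.map_append, List.map_cons]
    have hsucc : ((n : Nat) : Int) + 1 = (((n + 1 : Nat)) : Int) := by push_cast; ring
    rw [hsucc]
    rw [ih (n + 1) _ (pre ++ [(c, pvFillInner results ((n : Nat) : Int) c)]) (by simp at hnodup ⊢; exact hnodup.2)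
      (by rw [hstep]; simp [pvFillInner])
      (by intro p hp
          simp at hp
          rcases hp with hp | rfl
          · have := hpre p hp; simp at this; exact fun h => this.2 h
          · simp at hnodup; exact hnodup.1)
      (hkeys ▸ hnd)]
    simp

theorem pv_slice_take3 {α : Type} (xs : List α) : PySem.List.slice xs none (some 3) = xs.take 3 := by
  simpa using PySem.List.slice_to_natCast xs 3

theorem pv_slice_drop3 {α : Type} (xs : List α) : PySem.List.slice xs (some 3) none = xs.drop 3 := by
  simpa using PySem.List.slice_from_natCast xs 3

-- A's per-index inner dicts along enumerate(companies) are B's chunk dicts along the list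
theorem pvBridge (results : List (List (String × String))) :
    ∀ (cs : List String) (n : Nat),
      (PySem.List.enumerate cs ((n : Nat) : Int)).map (fun ic => (ic.2, pvFillInner results ic.1 ic.2))
      = pvSpec (results.drop (3 * n)) cs := by
  intro cs
  induction cs with
  | nil => intro n; simp [PySem.List.enumerate_nil, pvSpec]
  | cons c cs ih =>
    intro n
    rw [PySem.List.enumerate_cons, List.map_cons]
    have hsucc : ((n : Nat) : Int) + 1 = (((n + 1 : Nat)) : Int) := by push_cast; ring
    rw [hsucc, ih (n + 1)]
    simp only [pvSpec, pvFillInner_eq]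
    rw [List.drop_drop, show 3 * (n + 1) = 3 * n + 3 from by ring]

-- B's loop: each company appends its (fresh) entry built from the next chunk of 3
theorem pvB :
    ∀ (cs : List String), cs.Nodup →
    ∀ (d : PySem.Dict String (PySem.Dict String (List (String × String)))) (res : List (List (String × String))),
      d.keys.Nodup → (∀ c ∈ cs, d.contains c = false) →
      ((cs.foldl (fun (st : PySem.Dict String (PySem.Dict String (List (String × String))) × List (List (String × String))) c =>
        let chunk := PySem.List.slice st.2 none (some 3)
        let rest := PySem.List.slice st.2 (some 3) none
        let keys := pvQueryTypes.map (fun q => pvKey q c)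
        (st.1.insert c (PySem.Dict.ofList (keys.zip chunk)), rest)) (d, res)).1).items
      = d.items ++ pvSpec res cs := by
  intro cs
  induction cs with
  | nil => intro _ d res _ _; simp [pvSpec]
  | cons c cs ih =>
    intro hnodup d res hnd hfresh
    rw [List.foldl_cons]
    simp only [pv_slice_take3, pv_slice_drop3] at ih ⊢
    have hcfresh : d.contains c = false := hfresh c (by simp)
    rw [ih (by simp at hnodup; exact hnodup.2) _ _ (PySem.Dict.nodup_keys_insert d c _ hnd)
      (by intro c' hc'
          rw [PySem.Dict.contains_insert]
          have h1 : (c' == c) = false := by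
            simp at hnodup ⊢
            intro h; exact hnodup.1 (h ▸ hc')
          rw [h1, hfresh c' (by simp [hc'])]
          simp)]
    rw [PySem.Dict.items_insert_of_not_contains d _ hcfresh]
    simp [pvSpec, pvInner]

theorem pvInit (companies : List String) (h : companies.Nodup) :
    (companies.foldl (fun d c => d.insert c PySem.Dict.empty)
      (PySem.Dict.empty : PySem.Dict String (PySem.Dict String (List (String × String))))).items
    = companies.map (fun c => (c, PySem.Dict.empty)) := by
  simpa using PySem.Dict.items_foldl_insert_fresh companies id (fun _ => PySem.Dict.empty)
    PySem.Dict.empty (by simp) (by simpa using h)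

-- ===== VERDICT (by name: the statement is the Claim_ definition above) =====
theorem organize_results_by_company_py_spec : Claim_equal_organize_results_by_company_py := by
  intro results companies _ h
  show organize_results_by_company_py results companies = organize_results_by_company_py_alt results companies
  simp only [organize_results_by_company_py, organize_results_by_company_py_alt]
  have hinit := pvInit companies h
  have hknd : (companies.foldl (fun d c => d.insert c PySem.Dict.empty)
      (PySem.Dict.empty : PySem.Dict String (PySem.Dict String (List (String × String))))).keys.Nodup := by
    simp only [PySem.Dict.keys, hinit]
    simpa [List.map_map, Function.comp_def] using h
  have hA := pvFillA results companies 0 _ [] h (by simpa using hinit) (by simp) hknd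
  simp only [Nat.cast_zero] at hA
  have hBr := pvBridge results companies 0
  simp only [Nat.cast_zero, Nat.mul_zero, List.drop_zero] at hBr
  have hB := pvB companies h PySem.Dict.empty results (by simp) (by simp)
  rw [hA]
  simp only [List.nil_append, hBr]
  rw [hB]
  rfl
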